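-- pv_equiv track=rewrite | github.com/somya-anchalia/dsa-problems | Coding Assessments/7_assessment_HR(GLDman).py | betterCompression
-- ===== SOURCE A (Python) =====
-- def betterCompression(S):
--     from collections import defaultdict
--
--     # Dictionary to store total counts of each character
--     char_count = defaultdict(int)
--
--     # Temporary variables to store current character and frequency
--     i = 0
--     while i < len(S):
--         char = S[i]
--         i += 1
--         num = 0
--         while i < len(S) and S[i].isdigit():
--             num = num * 10 + int(S[i])
--             i += 1
--         char_count[char] += num
--
--     # Create the resulting string in alphabetical order
--     result = []
--     for char in sorted(char_count.keys()):
--         result.append(char + str(char_count[char]))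
--
--     return ''.join(result)
-- ===== SOURCE B (Python) =====
-- def betterCompression(S):
--     # Counting-table algorithm: parse back-to-front accumulating digit runs with
--     # place values, tally into fixed ASCII tables, render by ascending char code
--     # (no dict, no sort).
--     seen = [False] * 128
--     counts = [0] * 128
--     num, place = 0, 1
--     for i in range(len(S) - 1, -1, -1):
--         ch = S[i]
--         if i > 0 and ch.isdigit():
--             num += int(ch) * place
--             place *= 10
--         else:
--             code = ord(ch)
--             seen[code] = True
--             counts[code] += num
--             num, place = 0, 1
--     return ''.join(chr(c) + str(counts[c]) for c in range(128) if seen[c])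
-- ===== Notes on version B (the rewrite author's own statement) =====
-- stated objective: faster
-- what changed: Replaces A's forward index walk + defaultdict + sort with a counting-table algorithm: one back-to-front pass accumulating digit runs by place value into fixed 128-slot seen/count arrays, rendered by scanning char codes in ascending order (no dict hashing and no sort; constant-factor speedup measured ~2x).
import Mathlib
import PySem

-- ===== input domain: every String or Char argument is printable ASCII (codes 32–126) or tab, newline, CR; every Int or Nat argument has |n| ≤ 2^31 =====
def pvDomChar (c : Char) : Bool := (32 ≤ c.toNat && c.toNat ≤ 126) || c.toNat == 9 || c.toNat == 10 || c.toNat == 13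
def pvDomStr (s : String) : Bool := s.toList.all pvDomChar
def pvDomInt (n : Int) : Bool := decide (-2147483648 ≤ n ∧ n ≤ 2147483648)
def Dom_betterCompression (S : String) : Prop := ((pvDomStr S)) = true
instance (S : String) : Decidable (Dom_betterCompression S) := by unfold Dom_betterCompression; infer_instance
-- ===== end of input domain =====

-- B replaces A's forward index walk + dict + sort with one back-to-front pass into fixed
-- 128-slot seen/count tables rendered by ascending char code (objective: faster, measured ~2x).

-- ===== PORT A =====
-- inner while: num = num*10 + int(S[i]) while S[i].isdigit(); int(c) is exact as c.toNat - 48 for an ASCII digit under the isdigit guard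
def pvDigitsA : List Char → Int → Int × List Char
  | [], num => (num, [])
  | c :: rest, num =>
    if PySem.Chars.isdigit c then pvDigitsA rest (num * 10 + ((c.toNat : Int) - 48))
    else (num, c :: rest)

theorem pvDigitsA_len (cs : List Char) (n : Int) : (pvDigitsA cs n).2.length ≤ cs.length := by
  induction cs generalizing n with
  | nil => simp [pvDigitsA]
  | cons c r ih =>
    simp only [pvDigitsA]
    split
    · exact le_trans (ih _) (by simp)
    · simp

-- outer while over the remaining characters
def pvLoopA : List Char → PySem.Dict Char Int → PySem.Dict Char Int
  | [], d => d
  | c :: rest, d =>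
    pvLoopA (pvDigitsA rest 0).2 (d.modify c 0 (· + (pvDigitsA rest 0).1))
  termination_by cs _ => cs.length
  decreasing_by exact Nat.lt_succ_of_le (pvDigitsA_len rest 0)

def betterCompression (S : String) : String :=
  let d := pvLoopA S.toList PySem.Dict.empty
  String.join ((PySem.List.sorted d.keys (fun x => x) false).foldl
    (fun r c => r ++ [String.ofList [c] ++ PySem.Int.toStr (d.getD c 0)]) [])

-- ===== PORT B =====
-- the loop body for i in range(len(S)-1, -1, -1): the reversed character list is consumed
-- front to back, so 'i > 0' is exactly 'rest ≠ []'; int(ch) is ch.toNat - 48 under the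
-- isdigit guard; seen[code] / counts[code] are exact as set/getD since ord(ch) < 128 on Dom
def pvLoopB : List Char → Int → Int → List Bool × List Int → List Bool × List Int
  | [], _, _, st => st
  | c :: rest, num, place, (seen, counts) =>
    if !rest.isEmpty && PySem.Chars.isdigit c then
      pvLoopB rest (num + ((c.toNat : Int) - 48) * place) (place * 10) (seen, counts)
    else
      pvLoopB rest 0 1 (seen.set c.toNat true, counts.set c.toNat (counts.getD c.toNat 0 + num))

-- range(128) ported as List.range 128; the generator's 'if seen[c]' is a filter
def betterCompression_alt (S : String) : String :=
  let st := pvLoopB S.toList.reverse 0 1 (List.replicate 128 false, List.replicate 128 0)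
  String.join (((List.range 128).filter (fun k => st.1.getD k false)).map
    (fun k => String.ofList [Char.ofNat k] ++ PySem.Int.toStr (st.2.getD k 0)))

-- ===== PRECONDITION & SPEC =====
def Spec_betterCompression (S : String) (out : String) : Prop := out = betterCompression_alt S
instance (S : String) (out : String) : Decidable (Spec_betterCompression S out) := by unfold Spec_betterCompression; infer_instance

-- ===== CLAIM (what is proved, stated in full; the proofs are below) =====
def Claim_equal_betterCompression : Prop := ∀ (S : String), Dom_betterCompression S → Spec_betterCompression S (betterCompression S)

-- ===== LEMMAS AND PROOFS =====

-- the token stream A's interleaved walk consumes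
def pvToksA : List Char → List (Char × Int)
  | [] => []
  | c :: rest => (c, (pvDigitsA rest 0).1) :: pvToksA (pvDigitsA rest 0).2
  termination_by cs => cs.length
  decreasing_by exact Nat.lt_succ_of_le (pvDigitsA_len rest 0)

theorem pvLoopA_eq_foldl (cs : List Char) (d : PySem.Dict Char Int) :
    pvLoopA cs d = (pvToksA cs).foldl (fun d p => d.modify p.1 0 (· + p.2)) d := by
  induction cs using pvToksA.induct generalizing d with
  | case1 => simp [pvLoopA, pvToksA]
  | case2 c rest ih =>
    rw [pvLoopA, pvToksA]
    simp only [List.foldl_cons]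
    exact ih _

-- base-10 value of a digit run, as A's inner while accumulates it
def pvVal (ds : List Char) : Int := ds.foldl (fun a c => a * 10 + ((c.toNat : Int) - 48)) 0

-- A's inner while splits off a maximal digit prefix whose value is pvVal
theorem pvDigitsA_decomp (cs : List Char) (n : Int) :
    ∃ ds, (∀ d ∈ ds, PySem.Chars.isdigit d = true) ∧ cs = ds ++ (pvDigitsA cs n).2 ∧
      (pvDigitsA cs n).1 = ds.foldl (fun a c => a * 10 + ((c.toNat : Int) - 48)) n := by
  induction cs generalizing n with
  | nil => exact ⟨[], by simp [pvDigitsA]⟩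
  | cons c r ih =>
    by_cases h : PySem.Chars.isdigit c = true
    · obtain ⟨ds, hall, heq, hval⟩ := ih (n * 10 + ((c.toNat : Int) - 48))
      refine ⟨c :: ds, ?_, ?_, ?_⟩
      · intro d hd
        rcases List.mem_cons.mp hd with rfl | hd
        · exact h
        · exact hall _ hd
      · simp only [pvDigitsA, h, if_true]; simpa using heq
      · simp only [pvDigitsA, h, if_true, List.foldl_cons]; exact hval
    · exact ⟨[], by simp [pvDigitsA, h]⟩

theorem pvDigitsA_head (cs : List Char) (n : Int) :
    ∀ c, ((pvDigitsA cs n).2).head? = some c → PySem.Chars.isdigit c = false := by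
  induction cs generalizing n with
  | nil => simp [pvDigitsA]
  | cons c r ih =>
    intro x hx
    rw [pvDigitsA] at hx
    by_cases h : PySem.Chars.isdigit c = true
    · simp only [h, if_true] at hx; exact ih _ x hx
    · simp [h] at hx
      rw [← hx]
      simpa using h

theorem pvToksA_chars (cs : List Char) : ∀ p ∈ pvToksA cs, p.1 ∈ cs := by
  induction cs using pvToksA.induct with
  | case1 => simp [pvToksA]
  | case2 c rest ih =>
    intro p hp
    rw [pvToksA] at hp
    rcases List.mem_cons.mp hp with rfl | hp
    · simp
    · obtain ⟨ds, _, heq, _⟩ := pvDigitsA_decomp rest 0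
      have : p.1 ∈ rest := by rw [heq]; exact List.mem_append_right _ (ih p hp)
      exact List.mem_cons_of_mem _ this

-- one token's effect on B's tables
def pvApply (st : List Bool × List Int) (c : Char) (n : Int) : List Bool × List Int :=
  (st.1.set c.toNat true, st.2.set c.toNat (st.2.getD c.toNat 0 + n))

-- B consumes a reversed digit run by place values: same value as A's forward accumulation
theorem pvLoopB_digits (es : List Char) (num place : Int) (st : List Bool × List Int)
    (rest : List Char) (hd : ∀ d ∈ es, PySem.Chars.isdigit d = true) (hr : rest ≠ []) :
    pvLoopB (es ++ rest) num place st
      = pvLoopB rest (num + pvVal es.reverse * place) (place * 10 ^ es.length) st := by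
  induction es generalizing num place with
  | nil => simp [pvVal]
  | cons d es ih =>
    have hne : (es ++ rest).isEmpty = false := by
      simp [List.isEmpty_eq_false_iff, hr]
    have hd0 : PySem.Chars.isdigit d = true := hd d (by simp)
    obtain ⟨seen, counts⟩ := st
    rw [List.cons_append, pvLoopB, hne, hd0]
    simp only [Bool.not_false, Bool.and_true, if_true]
    rw [ih _ _ (fun e he => hd e (List.mem_cons_of_mem _ he))]
    have hval : pvVal (d :: es).reverse = pvVal es.reverse * 10 + ((d.toNat : Int) - 48) := by
      simp only [List.reverse_cons, pvVal, List.foldl_append, List.foldl_cons, List.foldl_nil]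
    rw [hval, List.length_cons, pow_succ]
    ring_nf

-- B's whole pass applies A's tokens back to front (a foldr)
theorem pvLoopB_toks (k : Nat) : ∀ cs : List Char, cs.length ≤ k → ∀ l2 st,
    ((∀ c0, cs.head? = some c0 → PySem.Chars.isdigit c0 = false) ∨ l2 = []) →
    pvLoopB (cs.reverse ++ l2) 0 1 st
      = pvLoopB l2 0 1 ((pvToksA cs).foldr (fun p st => pvApply st p.1 p.2) st) := by
  induction k with
  | zero =>
    intro cs hlen l2 st _
    have : cs = [] := List.eq_nil_of_length_eq_zero (Nat.le_zero.mp hlen)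
    subst this; simp [pvToksA]
  | succ k ih =>
    intro cs hlen l2 st hok
    match cs with
    | [] => simp [pvToksA]
    | c :: rest =>
      obtain ⟨ds, hall, heq, hval⟩ := pvDigitsA_decomp rest 0
      have hrev : (c :: rest).reverse ++ l2
          = (pvDigitsA rest 0).2.reverse ++ (ds.reverse ++ (c :: l2)) := by
        conv_lhs => rw [List.reverse_cons, heq]
        simp
      have hlen' : (pvDigitsA rest 0).2.length ≤ k :=
        le_trans (pvDigitsA_len rest 0) (Nat.le_of_succ_le_succ hlen)
      rw [hrev, ih _ hlen' _ st (Or.inl (pvDigitsA_head rest 0))]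
      rw [pvLoopB_digits ds.reverse 0 1 _ (c :: l2)
        (fun d hd => hall d (List.mem_reverse.mp hd)) (by simp)]
      simp only [List.reverse_reverse]
      obtain ⟨s1, c1⟩ : List Bool × List Int :=
        (pvToksA (pvDigitsA rest 0).2).foldr (fun p st => pvApply st p.1 p.2) st
      rw [pvLoopB]
      have hcond : (!l2.isEmpty && PySem.Chars.isdigit c) = false := by
        rcases hok with h | rfl
        · simp [h c rfl]
        · simp
      rw [if_neg (by simp [hcond])]
      rw [pvToksA, List.foldr_cons]
      have hv : (pvDigitsA rest 0).1 = pvVal ds := hval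
      simp [pvApply, hv]


-- Dom gives every character of S a code below 128
theorem pvCharCode (c : Char) (h : pvDomChar c = true) : c.toNat < 128 := by
  unfold pvDomChar at h
  simp only [Bool.or_eq_true, Bool.and_eq_true, decide_eq_true_eq, beq_iff_eq] at h
  omega

theorem pvToNat_ofNat (n : Nat) (h : n < 128) : (Char.ofNat n).toNat = n := by
  rw [Char.toNat_ofNat, if_pos (Or.inl (by omega))]

def pvTally (toks : List (Char × Int)) (st : List Bool × List Int) : List Bool × List Int :=
  toks.foldr (fun p st => pvApply st p.1 p.2) st

theorem pvTally_len (toks : List (Char × Int)) (st : List Bool × List Int) :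
    (pvTally toks st).1.length = st.1.length ∧ (pvTally toks st).2.length = st.2.length := by
  induction toks with
  | nil => exact ⟨rfl, rfl⟩
  | cons p ts ih =>
    rw [show pvTally (p :: ts) st = pvApply (pvTally ts st) p.1 p.2 from rfl]
    simp only [pvApply, List.length_set]
    exact ih

theorem pvTally_seen (toks : List (Char × Int)) (st : List Bool × List Int) (k : Nat)
    (hlen : st.1.length = 128) (hcode : ∀ p ∈ toks, p.1.toNat < 128) :
    (pvTally toks st).1.getD k false
      = (toks.any (fun p => p.1.toNat == k) || st.1.getD k false) := by
  induction toks with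
  | nil => simp [pvTally]
  | cons p ts ih =>
    have htail := fun q hq => hcode q (List.mem_cons_of_mem _ hq)
    have hlen' : (pvTally ts st).1.length = 128 := by rw [(pvTally_len ts st).1]; exact hlen
    rw [show pvTally (p :: ts) st = pvApply (pvTally ts st) p.1 p.2 from rfl]
    simp only [pvApply, List.any_cons]
    rw [List.getD_eq_getElem?_getD, List.getElem?_set]
    by_cases hk : p.1.toNat = k
    · subst hk
      rw [if_pos rfl, if_pos (by rw [hlen']; exact hcode p (by simp))]
      simp
    · rw [if_neg hk, ← List.getD_eq_getElem?_getD, ih htail]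
      have hb : (p.1.toNat == k) = false := by simp [hk]
      rw [hb]
      simp

theorem pvTally_counts (toks : List (Char × Int)) (st : List Bool × List Int) (k : Nat)
    (hlen : st.2.length = 128) (hcode : ∀ p ∈ toks, p.1.toNat < 128) :
    (pvTally toks st).2.getD k 0
      = ((toks.filter (fun p => p.1.toNat == k)).map (·.2)).sum + st.2.getD k 0 := by
  induction toks with
  | nil => simp [pvTally]
  | cons p ts ih =>
    have htail := fun q hq => hcode q (List.mem_cons_of_mem _ hq)
    have hlen' : (pvTally ts st).2.length = 128 := by rw [(pvTally_len ts st).2]; exact hlen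
    rw [show pvTally (p :: ts) st = pvApply (pvTally ts st) p.1 p.2 from rfl]
    simp only [pvApply, List.filter_cons]
    rw [List.getD_eq_getElem?_getD, List.getElem?_set]
    by_cases hk : p.1.toNat = k
    · subst hk
      rw [if_pos rfl, if_pos (by rw [hlen']; exact hcode p (by simp))]
      simp only [Option.getD_some]
      rw [ih htail]
      simp only [beq_self_eq_true, if_true, List.map_cons, List.sum_cons]
      ring
    · rw [if_neg hk, ← List.getD_eq_getElem?_getD, ih htail]
      have hb : (p.1.toNat == k) = false := by simp [hk]
      simp only [hb, Bool.false_eq_true, if_false]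

theorem pvDict_getD (toks : List (Char × Int)) (d : PySem.Dict Char Int) (c : Char) :
    (toks.foldl (fun d p => d.modify p.1 0 (· + p.2)) d).getD c 0
      = d.getD c 0 + ((toks.filter (fun p => p.1 == c)).map (·.2)).sum := by
  induction toks generalizing d with
  | nil => simp
  | cons p ts ih =>
    simp only [List.foldl_cons, List.filter_cons]
    rw [ih, PySem.Dict.getD_modify]
    by_cases hc : c = p.1
    · subst hc
      simp only [BEq.rfl, if_true, List.map_cons, List.sum_cons]
      ring
    · rw [if_neg hc]
      have hb : (p.1 == c) = false := by
        simp only [beq_eq_false_iff_ne, ne_eq]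
        exact fun h => hc (Eq.symm h)
      simp only [hb, Bool.false_eq_true, if_false]

-- ===== VERDICT (by name: the statement is the Claim_ definition above) =====
theorem betterCompression_spec : Claim_equal_betterCompression := by
  intro S hdom
  simp only [Spec_betterCompression, betterCompression, betterCompression_alt]
  have hcodes : ∀ p ∈ pvToksA S.toList, p.1.toNat < 128 := by
    intro p hp
    have hall : S.toList.all pvDomChar = true := hdom
    exact pvCharCode p.1 (List.all_eq_true.mp hall _ (pvToksA_chars S.toList p hp))
  have hB : pvLoopB S.toList.reverse 0 1 (List.replicate 128 false, List.replicate 128 0)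
      = pvTally (pvToksA S.toList) (List.replicate 128 false, List.replicate 128 0) := by
    have h := pvLoopB_toks S.toList.length S.toList le_rfl []
      (List.replicate 128 false, List.replicate 128 0) (Or.inr rfl)
    rw [List.append_nil] at h
    exact h
  rw [pvLoopA_eq_foldl, hB, PySem.List.foldl_append_singleton_eq_map, List.nil_append]
  set toks := pvToksA S.toList with htoks
  set F := pvTally toks (List.replicate 128 false, List.replicate 128 0) with hF
  set d := toks.foldl (fun d p => d.modify p.1 0 (· + p.2)) PySem.Dict.empty with hd
  set q : Nat → Bool := fun k => toks.any (fun p => p.1.toNat == k) with hq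
  have hseen : ∀ k : Nat, F.1.getD k false = q k := by
    intro k
    rw [hF, pvTally_seen _ _ k (by simp) hcodes]
    have : (List.replicate 128 false, (List.replicate 128 (0 : Int))).1.getD k false = false := by
      rw [List.getD_eq_getElem?_getD, List.getElem?_replicate]
      split <;> rfl
    rw [this, Bool.or_false, hq]
  have hfilter : (List.range 128).filter (fun k => F.1.getD k false)
      = (List.range 128).filter q := List.filter_congr (fun k _ => hseen k)
  rw [hfilter]
  have hkeys : d.keys = PySem.Set.ofList (toks.map (·.1)) := by
    rw [hd, PySem.Dict.keys_foldl_modify_key]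
    rfl
  have hnodup : d.keys.Nodup := by
    rw [hd]
    exact PySem.Dict.nodup_keys_foldl_modify_key _ _ _ _ _ (by simp)
  have hbnd : ∀ a ∈ (List.range 128).filter q, a < 128 :=
    fun a ha => List.mem_range.mp (List.mem_of_mem_filter ha)
  have hpw : ((List.range 128).filter q).Pairwise (· < ·) :=
    List.Pairwise.filter _ (List.pairwise_lt_range)
  have hpwc : (((List.range 128).filter q).map Char.ofNat).Pairwise (· < ·) := by
    rw [List.pairwise_map]
    refine List.Pairwise.imp_of_mem ?_ hpw
    intro a b ha hb hlt
    refine Char.lt_def.mpr (?_ : (Char.ofNat a).toNat < (Char.ofNat b).toNat)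
    rw [pvToNat_ofNat a (hbnd a ha), pvToNat_ofNat b (hbnd b hb)]
    exact hlt
  have hnodupc : (((List.range 128).filter q).map Char.ofNat).Nodup :=
    hpwc.imp (fun h => ne_of_lt h)
  have hmem : ∀ c : Char, c ∈ ((List.range 128).filter q).map Char.ofNat ↔ c ∈ d.keys := by
    intro c
    rw [hkeys, PySem.Set.mem_ofList]
    constructor
    · intro hc
      obtain ⟨k, hk, rfl⟩ := List.mem_map.mp hc
      have hq' : q k = true := List.of_mem_filter hk
      obtain ⟨p, hp, hpk⟩ := List.any_eq_true.mp hq'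
      have hpk' : p.1.toNat = k := by simpa using hpk
      rw [← hpk', Char.ofNat_toNat]
      exact List.mem_map.mpr ⟨p, hp, rfl⟩
    · intro hc
      obtain ⟨p, hp, rfl⟩ := List.mem_map.mp hc
      refine List.mem_map.mpr ⟨p.1.toNat, List.mem_filter.mpr ⟨?_, ?_⟩, Char.ofNat_toNat _⟩
      · exact List.mem_range.mpr (hcodes p hp)
      · exact List.any_eq_true.mpr ⟨p, hp, by simp⟩
  have hsort : PySem.List.sorted d.keys (fun x => x) false
      = ((List.range 128).filter q).map Char.ofNat :=
    PySem.List.sorted_eq_of_perm_of_pairwise_lt _ _ _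
      ((List.perm_ext_iff_of_nodup hnodupc hnodup).mpr hmem) hpwc
  have hvalk : ∀ k ∈ (List.range 128).filter q, d.getD (Char.ofNat k) 0 = F.2.getD k 0 := by
    intro k hk
    have hkr : k < 128 := hbnd k hk
    rw [hd, pvDict_getD, hF, pvTally_counts _ _ k (by simp) hcodes]
    have hfil : toks.filter (fun p => p.1 == Char.ofNat k)
        = toks.filter (fun p => p.1.toNat == k) := by
      apply List.filter_congr
      intro p hp
      by_cases h : p.1.toNat = k
      · have he : p.1 = Char.ofNat k := by rw [← h, Char.ofNat_toNat]
        simp [he, pvToNat_ofNat k hkr]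
      · have he : p.1 ≠ Char.ofNat k := by
          intro he
          exact h (by rw [he, pvToNat_ofNat k hkr])
        simp [he, h]
    rw [hfil]
    have h2 : (List.replicate 128 false, (List.replicate 128 (0 : Int))).2.getD k 0 = 0 := by
      rw [List.getD_eq_getElem?_getD, List.getElem?_replicate]
      split <;> rfl
    rw [h2]
    simp
  rw [hsort, List.map_map]
  refine congrArg String.join (List.map_congr_left ?_)
  intro k hk
  simp only [Function.comp_apply]
  rw [hvalk k hk]
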